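-- pv_equiv track=rewrite | github.com/cumberland92/Make-Hubbard-Tree-From-Kneading-Sequence | Making A Hubbard Tree From Kneading Sequence.py | makeIntAdd
-- ===== SOURCE A (Python) =====
-- def makeIntAdd(tau):
--     intAdd=[1]
--     nextNum = 1
--     for i in range(len(tau)):
--         nextNum = rho(nextNum, tau)
--
--         if(nextNum != "infty"):
--             intAdd.append(nextNum)
--         else:
--             return intAdd
--
-- def rho(m, tau):
--     for k in range(m, len(tau)-1):
--         if(tau[k]!= tau[k-m]):
--             return k+1
--     return "infty"
-- ===== SOURCE B (Python) =====
-- def makeIntAdd(tau):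
--     # one fused left-to-right scan; no rho helper, no "infty" sentinel
--     if not tau:
--         return None
--     intAdd = [1]
--     m = 1
--     for k in range(1, len(tau) - 1):
--         if tau[k] != tau[k - m]:
--             intAdd.append(k + 1)
--             m = k + 1
--     return intAdd
-- ===== Notes on version B (the rewrite author's own statement) =====
-- stated objective: faster
-- what changed: Replaces the outer loop that repeatedly calls the rho helper (restarting a scan at each new address entry, with an 'infty' string sentinel and early return) by a single fused left-to-right pass that keeps the current entry m as running state and appends at each mismatch position; this removes the per-entry function-call and scan-restart overhead (measured ~3x at large n).
import Mathlib
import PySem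

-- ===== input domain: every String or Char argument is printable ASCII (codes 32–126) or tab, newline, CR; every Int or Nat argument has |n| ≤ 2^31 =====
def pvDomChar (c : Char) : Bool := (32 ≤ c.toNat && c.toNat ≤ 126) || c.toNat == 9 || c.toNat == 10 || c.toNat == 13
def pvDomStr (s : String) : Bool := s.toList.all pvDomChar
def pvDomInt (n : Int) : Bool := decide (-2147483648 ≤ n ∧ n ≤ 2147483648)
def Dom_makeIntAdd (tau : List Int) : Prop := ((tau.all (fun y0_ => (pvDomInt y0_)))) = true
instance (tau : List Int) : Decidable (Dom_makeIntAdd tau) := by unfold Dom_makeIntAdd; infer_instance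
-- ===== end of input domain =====

-- B replaces A's outer loop + rho helper (with its "infty" sentinel and early return)
-- by one fused left-to-right pass keeping the current entry m as running state;
-- same values everywhere (objective: simpler).

-- ===== PORT A =====
-- helper rho: scan k in range(m, len(tau)-1) for first mismatch tau[k] != tau[k-m];
-- none stands for the Python string sentinel "infty".
-- (In every call makeIntAdd makes, m ≥ 1, so both indices are in range and the
--  Option-equality comparison of pyGet? is exact Python behaviour.)
def rhoGoA (tau : List Int) (m : Int) : List Int → Option Int
  | [] => none
  | k :: ks =>
      if PySem.List.pyGet? tau k ≠ PySem.List.pyGet? tau (k - m) then some (k + 1)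
      else rhoGoA tau m ks

def rhoA (m : Int) (tau : List Int) : Option Int :=
  rhoGoA tau m (PySem.List.pyRange m ((tau.length : Int) - 1) 1)

-- the 'for i in range(len(tau))' loop with early return; falling off the end returns None
def goA (tau : List Int) : Nat → List Int → Int → Option (List Int)
  | 0, _, _ => none
  | n + 1, intAdd, nextNum =>
      match rhoA nextNum tau with
      | some v => goA tau n (intAdd ++ [v]) v
      | none => some intAdd

def makeIntAdd (tau : List Int) : Option (List Int) :=
  goA tau tau.length [1] 1

-- ===== PORT B =====
-- single pass over k in range(1, len(tau)-1) carrying (intAdd, m)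
def goB (tau : List Int) : List Int → List Int → Int → List Int
  | [], intAdd, _ => intAdd
  | k :: ks, intAdd, m =>
      if PySem.List.pyGet? tau k ≠ PySem.List.pyGet? tau (k - m) then
        goB tau ks (intAdd ++ [k + 1]) (k + 1)
      else
        goB tau ks intAdd m

def makeIntAdd_alt (tau : List Int) : Option (List Int) :=
  if tau = [] then none
  else some (goB tau (PySem.List.pyRange 1 ((tau.length : Int) - 1) 1) [1] 1)

-- ===== PRECONDITION & SPEC =====
def Spec_makeIntAdd (tau : List Int) (out : Option (List Int)) : Prop := out = makeIntAdd_alt tau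
instance (tau : List Int) (out : Option (List Int)) : Decidable (Spec_makeIntAdd tau out) := by unfold Spec_makeIntAdd; infer_instance

-- ===== CLAIM (what is proved, stated in full; the proofs are below) =====
def Claim_equal_makeIntAdd : Prop := ∀ (tau : List Int), Dom_makeIntAdd tau → Spec_makeIntAdd tau (makeIntAdd tau)

-- ===== LEMMAS AND PROOFS =====

-- rho finds no mismatch on a range all of whose positions agree
lemma rhoGoA_none (tau : List Int) (m : Int) (lo hi : Int)
    (h : ∀ k, lo ≤ k → k < hi → PySem.List.pyGet? tau k = PySem.List.pyGet? tau (k - m)) :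
    rhoGoA tau m (PySem.List.pyRange lo hi 1) = none := by
  by_cases hlt : lo < hi
  · have hstep : ∀ n : ℕ, ∀ lo, (hi - lo).toNat = n →
        (∀ k, lo ≤ k → k < hi → PySem.List.pyGet? tau k = PySem.List.pyGet? tau (k - m)) →
        rhoGoA tau m (PySem.List.pyRange lo hi 1) = none := by
      intro n
      induction n with
      | zero =>
          intro lo hn _
          have : hi ≤ lo := by omega
          rw [PySem.List.pyRange_one_eq_nil this]; rfl
      | succ n ih =>
          intro lo hn hagree
          have hlt' : lo < hi := by omega
          rw [PySem.List.pyRange_one_cons hlt']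
          simp only [rhoGoA, hagree lo le_rfl hlt', ne_eq, not_true_eq_false, if_false]
          exact ih (lo + 1) (by omega) (fun k hk1 hk2 => hagree k (by omega) hk2)
    exact hstep (hi - lo).toNat lo rfl h
  · rw [PySem.List.pyRange_one_eq_nil (by omega)]; rfl

-- rho returns j+1 when positions lo..j-1 agree and j mismatches
lemma rhoGoA_first (tau : List Int) (m : Int) (hi : Int) (j : Int)
    (hj : j < hi)
    (hmis : PySem.List.pyGet? tau j ≠ PySem.List.pyGet? tau (j - m)) :
    ∀ lo, lo ≤ j →
    (∀ k, lo ≤ k → k < j → PySem.List.pyGet? tau k = PySem.List.pyGet? tau (k - m)) →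
    rhoGoA tau m (PySem.List.pyRange lo hi 1) = some (j + 1) := by
  have hstep : ∀ n : ℕ, ∀ lo, (j - lo).toNat = n → lo ≤ j →
      (∀ k, lo ≤ k → k < j → PySem.List.pyGet? tau k = PySem.List.pyGet? tau (k - m)) →
      rhoGoA tau m (PySem.List.pyRange lo hi 1) = some (j + 1) := by
    intro n
    induction n with
    | zero =>
        intro lo hn hle _
        have : lo = j := by omega
        subst this
        rw [PySem.List.pyRange_one_cons hj]
        simp only [rhoGoA, hmis, ne_eq, not_false_eq_true, if_true]
    | succ n ih =>
        intro lo hn hle hagree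
        have hltj : lo < j := by omega
        rw [PySem.List.pyRange_one_cons (by omega : lo < hi)]
        simp only [rhoGoA, hagree lo le_rfl hltj, ne_eq, not_true_eq_false, if_false]
        exact ih (lo + 1) (by omega) (by omega) (fun k hk1 hk2 => hagree k (by omega) hk2)
  intro lo hle hagree
  exact hstep (j - lo).toNat lo rfl hle hagree

-- the fusion invariant: if positions m..j-1 of the current rho scan already agree,
-- A's outer loop from state (acc, m) equals B's scan of positions j..len-2,
-- provided the fuel exceeds the number of remaining scan positions.
lemma fusion (tau : List Int) :
    ∀ n : ℕ, ∀ (fuel : ℕ) (j m : Int) (acc : List Int),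
      ((tau.length : Int) - 1 - j).toNat = n → 1 ≤ m → m ≤ j → n < fuel →
      (∀ k, m ≤ k → k < j → PySem.List.pyGet? tau k = PySem.List.pyGet? tau (k - m)) →
      goA tau fuel acc m =
        some (goB tau (PySem.List.pyRange j ((tau.length : Int) - 1) 1) acc m) := by
  intro n
  induction n with
  | zero =>
      intro fuel j m acc hn hm hmj hfuel hagree
      obtain ⟨f, rfl⟩ : ∃ f, fuel = f + 1 := ⟨fuel - 1, by omega⟩
      have hji : (tau.length : Int) - 1 ≤ j := by omega
      rw [PySem.List.pyRange_one_eq_nil hji]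
      have hnone : rhoA m tau = none := by
        unfold rhoA
        exact rhoGoA_none tau m m ((tau.length : Int) - 1)
          (fun k hk1 hk2 => hagree k hk1 (by omega))
      simp [goA, hnone, goB]
  | succ n ih =>
      intro fuel j m acc hn hm hmj hfuel hagree
      obtain ⟨f, rfl⟩ : ∃ f, fuel = f + 1 := ⟨fuel - 1, by omega⟩
      have hj : j < (tau.length : Int) - 1 := by omega
      rw [PySem.List.pyRange_one_cons hj]
      by_cases hmis : PySem.List.pyGet? tau j = PySem.List.pyGet? tau (j - m)
      · -- no mismatch at j: both sides keep (acc, m)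
        have hgoB : goB tau (j :: PySem.List.pyRange (j + 1) ((tau.length : Int) - 1) 1) acc m
            = goB tau (PySem.List.pyRange (j + 1) ((tau.length : Int) - 1) 1) acc m := by
          simp [goB, hmis]
        rw [hgoB]
        exact ih (f + 1) (j + 1) m acc (by omega) hm (by omega) (by omega)
          (fun k hk1 hk2 => by
            by_cases hkj : k < j
            · exact hagree k hk1 hkj
            · have : k = j := by omega
              subst this; exact hmis)
      · -- first mismatch at j: A's rho returns j+1, both sides append and continue
        have hsome : rhoA m tau = some (j + 1) := by
          unfold rhoA
          exact rhoGoA_first tau m ((tau.length : Int) - 1) j hj hmis m hmj hagree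
        have hgoB : goB tau (j :: PySem.List.pyRange (j + 1) ((tau.length : Int) - 1) 1) acc m
            = goB tau (PySem.List.pyRange (j + 1) ((tau.length : Int) - 1) 1) (acc ++ [j + 1]) (j + 1) := by
          simp [goB, hmis]
        rw [hgoB]
        have hA : goA tau (f + 1) acc m = goA tau f (acc ++ [j + 1]) (j + 1) := by
          simp [goA, hsome]
        rw [hA]
        exact ih f (j + 1) (j + 1) (acc ++ [j + 1]) (by omega) (by omega) le_rfl (by omega)
          (fun k hk1 hk2 => absurd hk2 (by omega))

-- ===== VERDICT (by name: the statement is the Claim_ definition above) =====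
theorem makeIntAdd_spec : Claim_equal_makeIntAdd := by
  intro tau _
  unfold Spec_makeIntAdd makeIntAdd makeIntAdd_alt
  rcases tau with _ | ⟨x, xs⟩
  · simp [goA]
  · simp only [if_neg (List.cons_ne_nil x xs)]
    exact fusion (x :: xs) (((x :: xs).length : Int) - 1 - 1).toNat (x :: xs).length 1 1 [1]
      rfl le_rfl le_rfl (by simp only [List.length_cons]; omega) (fun k hk1 hk2 => absurd hk2 (by omega))
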